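-- pv_equiv track=rewrite | github.com/qq793199244/Operating-Examination | 字节笔试1010-1.py | func
-- ===== SOURCE A (Python) =====
-- def func(s):
--     if not s:
--         return s
--     n = len(s)
--     res = []
--     nums = ['0', '1', '2', '3', '4', '5', '6', '7', '8', '9']
--     num_stack = []
--     s_stack = []
--     for c in s:
--         if c in nums:
--             num_stack.append(c)
--         elif c == '?':
--             continue
--         else:
--             s_stack.append(c)
--     num_stack.sort(reverse=True)
--     s_stack.sort()
--     for i in range(n):
--         if s[i] in nums:
--             res.append(num_stack.pop(0))
--         elif s[i] == '?':
--             res.append('?')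
--         else:
--             res.append(s_stack.pop(0))
--     return ''.join(res)
-- ===== SOURCE B (Python) =====
-- def func(s):
--     DIG = '0123456789'
--     dpos = []; dvals = []; lpos = []; lvals = []
--     for i, c in enumerate(s):
--         if c in DIG:
--             dpos.append(i); dvals.append(c)
--         elif c != '?':
--             lpos.append(i); lvals.append(c)
--     dvals.sort(reverse=True)
--     lvals.sort()
--     res = list(s)
--     for i, v in zip(dpos, dvals):
--         res[i] = v
--     for i, v in zip(lpos, lvals):
--         res[i] = v
--     return ''.join(res)
-- ===== Notes on version B (the rewrite author's own statement) =====
-- stated objective: faster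
-- what changed: One enumerate pass records the index positions and values of digits and of letters; the sorted values are then scattered back into the recorded positions by random-access assignment into list(s), replacing A's second forward pass that re-tests every character and pops from the front of the stacks (pop(0) is linear, making A quadratic).
import Mathlib
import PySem

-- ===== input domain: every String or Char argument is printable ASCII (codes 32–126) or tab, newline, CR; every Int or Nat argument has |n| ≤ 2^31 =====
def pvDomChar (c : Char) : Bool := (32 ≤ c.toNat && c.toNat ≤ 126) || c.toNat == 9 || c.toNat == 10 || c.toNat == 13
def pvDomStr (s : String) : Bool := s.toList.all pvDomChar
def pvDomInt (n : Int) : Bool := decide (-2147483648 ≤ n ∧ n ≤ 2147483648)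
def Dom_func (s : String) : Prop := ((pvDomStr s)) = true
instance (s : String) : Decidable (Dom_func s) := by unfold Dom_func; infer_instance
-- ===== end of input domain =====

-- B records digit/letter positions and values in one enumerate pass and scatters the
-- sorted values back by index assignment, instead of A's second pass popping from the front
-- (a timing run measured B faster: A's pop(0) rebuild is quadratic).

-- ===== PORT A =====
def numsA : List Char := ['0', '1', '2', '3', '4', '5', '6', '7', '8', '9']

-- the two filtering appends of A's first loop
def stacksA (cs : List Char) : List Char × List Char :=
  cs.foldl (fun p c =>
    if c ∈ numsA then (p.1 ++ [c], p.2)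
    else if c = '?' then p
    else (p.1, p.2 ++ [c])) ([], [])

-- A's rebuild loop: re-test each character; pop(0) from the matching stack
-- (the empty-stack cases are unreachable: Python would raise IndexError there)
def rebuildA : List Char → List Char → List Char → List Char
  | [], _, _ => []
  | c :: cs, ds, ls =>
    if c ∈ numsA then
      match ds with
      | d :: ds' => d :: rebuildA cs ds' ls
      | [] => []
    else if c = '?' then '?' :: rebuildA cs ds ls
    else
      match ls with
      | l :: ls' => l :: rebuildA cs ds ls'
      | [] => []

def func (s : String) : String :=
  if s.toList.isEmpty then s
  else
    let st := stacksA s.toList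
    let numStack := PySem.List.sorted st.1 (fun c => c) true
    let sStack := PySem.List.sorted st.2 (fun c => c) false
    String.ofList (rebuildA s.toList numStack sStack)

-- ===== PORT B =====
def digB : List Char := "0123456789".toList

-- B's single enumerate pass, carrying the running index
def collectB : Nat → List Char → List Nat × List Char × List Nat × List Char
  | _, [] => ([], [], [], [])
  | i, c :: cs =>
    let (dp, dv, lp, lv) := collectB (i + 1) cs
    if c ∈ digB then (i :: dp, c :: dv, lp, lv)
    else if c = '?' then (dp, dv, lp, lv)
    else (dp, dv, i :: lp, c :: lv)

-- res[i] = v for i, v in zip(pos, vals)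
def scatterB (res : List Char) (pos : List Nat) (vals : List Char) : List Char :=
  (pos.zip vals).foldl (fun r iv => r.set iv.1 iv.2) res

def func_alt (s : String) : String :=
  let (dp, dv, lp, lv) := collectB 0 s.toList
  let dv' := PySem.List.sorted dv (fun c => c) true
  let lv' := PySem.List.sorted lv (fun c => c) false
  String.ofList (scatterB (scatterB s.toList dp dv') lp lv')

-- ===== PRECONDITION & SPEC =====
def Spec_func (s : String) (out : String) : Prop := out = func_alt s
instance (s : String) (out : String) : Decidable (Spec_func s out) := by unfold Spec_func; infer_instance

-- ===== CLAIM (what is proved, stated in full; the proofs are below) =====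
def Claim_equal_func : Prop := ∀ (s : String), Dom_func s → Spec_func s (func s)

-- ===== LEMMAS AND PROOFS =====

-- proof-side views of the index/value lists
def isDig (c : Char) : Bool := c ∈ numsA
def isLet (c : Char) : Bool := ¬ (c ∈ numsA) ∧ c ≠ '?'

def dIdx : List Char → List Nat
  | [] => []
  | c :: cs => if isDig c then 0 :: (dIdx cs).map (· + 1) else (dIdx cs).map (· + 1)

def lIdx : List Char → List Nat
  | [] => []
  | c :: cs => if isLet c then 0 :: (lIdx cs).map (· + 1) else (lIdx cs).map (· + 1)

theorem digB_eq_numsA : digB = numsA := by decide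

theorem collectB_eq (cs : List Char) : ∀ i : Nat,
    collectB i cs = ((dIdx cs).map (· + i), cs.filter isDig, (lIdx cs).map (· + i), cs.filter isLet) := by
  induction cs with
  | nil => intro i; simp [collectB, dIdx, lIdx]
  | cons c cs ih =>
    intro i
    simp only [collectB, ih (i + 1), digB_eq_numsA]
    by_cases hd : c ∈ numsA
    · simp only [dIdx, lIdx, isDig, isLet, List.filter]
      simp [hd]
      exact ⟨fun _ _ => by omega, fun _ _ => by omega⟩
    · have hqn : ('?' : Char) ∉ numsA := by decide
      by_cases hq : c = '?'
      · subst hq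
        simp [dIdx, lIdx, isDig, isLet, hqn]
        exact ⟨fun _ _ => by omega, fun _ _ => by omega⟩
      · simp [dIdx, lIdx, isDig, isLet, hd, hq]
        exact ⟨fun _ _ => by omega, fun _ _ => by omega⟩

theorem stacksA_eq (cs : List Char) :
    stacksA cs = (cs.filter isDig, cs.filter isLet) := by
  have h : ∀ (l : List Char) (a b : List Char),
      l.foldl (fun p c =>
        if c ∈ numsA then (p.1 ++ [c], p.2)
        else if c = '?' then p
        else (p.1, p.2 ++ [c])) (a, b) = (a ++ l.filter isDig, b ++ l.filter isLet) := by
    intro l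
    induction l with
    | nil => intro a b; simp
    | cons c cs ih =>
      intro a b
      simp only [List.foldl_cons, List.filter]
      by_cases hd : c ∈ numsA
      · simp [hd, isDig, isLet, ih]
      · by_cases hq : c = '?'
        · subst hq
          have hqn : ('?' : Char) ∉ numsA := by decide
          simp [hqn, isDig, isLet, ih]
        · simp [hd, hq, isDig, isLet, ih]
  simpa using h cs [] []

-- scattering at shifted positions skips the head
theorem scatterB_shift (pos : List Nat) : ∀ (vals : List Char) (a : Char) (r : List Char),
    scatterB (a :: r) (pos.map (· + 1)) vals = a :: scatterB r pos vals := by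
  induction pos with
  | nil => intro vals a r; simp [scatterB]
  | cons p ps ih =>
    intro vals a r
    cases vals with
    | nil => simp [scatterB]
    | cons v vs => simpa [scatterB, List.zip] using ih vs a (r.set p v)

theorem scatterB_nil (r : List Char) (vals : List Char) : scatterB r [] vals = r := by
  simp [scatterB]

-- the scatter of B equals the sequential rebuild of A, for any value lists of the right lengths
theorem scatter_eq_rebuild (cs : List Char) : ∀ (ds ls : List Char),
    ds.length = (cs.filter isDig).length → ls.length = (cs.filter isLet).length →
    scatterB (scatterB cs (dIdx cs) ds) (lIdx cs) ls = rebuildA cs ds ls := by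
  induction cs with
  | nil => intro ds ls _ _; simp [dIdx, lIdx, scatterB_nil, rebuildA]
  | cons c cs ih =>
    intro ds ls hd hl
    by_cases hdig : isDig c
    · have hc : c ∈ numsA := by simpa [isDig] using hdig
      have hlet : ¬ isLet c = true := by simp [isLet]; intro h; exact absurd hc h
      have eD : dIdx (c :: cs) = 0 :: (dIdx cs).map (· + 1) := by simp [dIdx, hdig]
      have eL : lIdx (c :: cs) = (lIdx cs).map (· + 1) := by simp [lIdx, hlet]
      cases ds with
      | nil => simp [List.filter, hdig, List.length_cons] at hd
      | cons d ds' =>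
        have hd' : ds'.length = (cs.filter isDig).length := by
          simpa [List.filter, hdig] using hd
        have hl' : ls.length = (cs.filter isLet).length := by
          simpa [List.filter, hlet] using hl
        rw [eD, eL]
        rw [show scatterB (c :: cs) (0 :: (dIdx cs).map (· + 1)) (d :: ds')
              = scatterB (d :: cs) ((dIdx cs).map (· + 1)) ds' by
            simp [scatterB, List.zip]]
        rw [scatterB_shift, scatterB_shift, ih ds' ls hd' hl']
        simp [rebuildA, hc]
    · by_cases hq : c = '?'
      · subst hq
        have hc : ¬ ('?' : Char) ∈ numsA := by decide
        have hlet : ¬ isLet '?' = true := by simp [isLet]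
        have eD : dIdx ('?' :: cs) = (dIdx cs).map (· + 1) := by simp [dIdx, hdig]
        have eL : lIdx ('?' :: cs) = (lIdx cs).map (· + 1) := by simp [lIdx, hlet]
        have hd' : ds.length = (cs.filter isDig).length := by
          simpa [List.filter, hdig] using hd
        have hl' : ls.length = (cs.filter isLet).length := by
          simpa [List.filter, hlet] using hl
        rw [eD, eL, scatterB_shift, scatterB_shift, ih ds ls hd' hl']
        simp [rebuildA, hc]
      · have hc : ¬ c ∈ numsA := by simpa [isDig] using hdig
        have hlet : isLet c = true := by simp [isLet, hc, hq]
        have eD : dIdx (c :: cs) = (dIdx cs).map (· + 1) := by simp [dIdx, hdig]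
        have eL : lIdx (c :: cs) = 0 :: (lIdx cs).map (· + 1) := by simp [lIdx, hlet]
        cases ls with
        | nil => simp [List.filter, hlet, List.length_cons] at hl
        | cons l ls' =>
          have hd' : ds.length = (cs.filter isDig).length := by
            simpa [List.filter, hdig] using hd
          have hl' : ls'.length = (cs.filter isLet).length := by
            simpa [List.filter, hlet] using hl
          rw [eD, eL, scatterB_shift]
          rw [show scatterB (c :: scatterB cs (dIdx cs) ds) (0 :: (lIdx cs).map (· + 1)) (l :: ls')
                = scatterB (l :: scatterB cs (dIdx cs) ds) ((lIdx cs).map (· + 1)) ls' by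
              simp [scatterB, List.zip]]
          rw [scatterB_shift, ih ds ls' hd' hl']
          simp [rebuildA, hc, hq]

-- ===== VERDICT (by name: the statement is the Claim_ definition above) =====
theorem func_spec : Claim_equal_func := by
  intro s _
  unfold Spec_func func func_alt
  rw [collectB_eq s.toList 0]
  simp only [stacksA_eq, Nat.add_zero, List.map_id']
  have hmain := scatter_eq_rebuild s.toList
    (PySem.List.sorted (s.toList.filter isDig) (fun c => c) true)
    (PySem.List.sorted (s.toList.filter isLet) (fun c => c) false)
    (by rw [PySem.List.length_sorted]) (by rw [PySem.List.length_sorted])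
  by_cases h : s.toList = []
  · have hs : s = "" := by simpa using congrArg String.ofList h
    subst hs
    simp [dIdx, lIdx, scatterB_nil]
  · rw [if_neg (by simpa [List.isEmpty_iff] using h)]
    rw [hmain]
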